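-- pv_equiv track=rewrite | github.com/pypi-data/pypi-mirror-403 | packages/jdti/jdti-0.2.2.tar.gz/jdti-0.2.2/jdti/utils.py | add_subnames
-- ===== SOURCE A (Python) =====
-- def add_subnames(names_list: list, parent_name: str, new_clusters: list):
--     """
--     Append sub-cluster names to a parent name within a list of names.
--
--     This function replaces occurrences of `parent_name` in `names_list` with
--     a concatenation of the parent name and corresponding sub-cluster name
--     from `new_clusters` (formatted as "parent.subcluster"). Non-matching names
--     are left unchanged.
--
--     Parameters
--     ----------
--     names_list : list
--         Original list of names (e.g., column names or cluster labels).
--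
--     parent_name : str
--         Name of the parent cluster to which sub-cluster names will be added.
--         Must exist in `names_list`.
--
--     new_clusters : list
--         List of sub-cluster names. Its length must match the number of times
--         `parent_name` occurs in `names_list`.
--
--     Returns
--     -------
--     list
--         Updated list of names with sub-cluster names appended to the parent name.
--
--     Raises
--     ------
--     ValueError
--         - If `parent_name` is not found in `names_list`.
--         - If `new_clusters` length does not match the number of occurrences of
--           `parent_name`.
--
--     Examples
--     --------
--     >>> add_subnames(['A', 'B', 'A'], 'A', ['1', '2'])
--     ['A.1', 'B', 'A.2']
--     """
--
--     if str(parent_name) not in [str(x) for x in names_list]: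
--         raise ValueError(
--             "Parent name is missing from the original dataset`s column names!"
--         )
--
--     if len(new_clusters) != len([x for x in names_list if str(x) == str(parent_name)]):
--         raise ValueError(
--             "New cluster names list has a different length than the number of clusters in the original dataset!"
--         )
--
--     new_names = []
--     ixn = 0
--     for _, i in enumerate(names_list):
--         if str(i) == str(parent_name):
--
--             new_names.append(f"{parent_name}.{new_clusters[ixn]}")
--             ixn += 1
--
--         else:
--             new_names.append(i)
--
--     return new_names
-- ===== SOURCE B (Python) =====
-- def add_subnames(names_list: list, parent_name: str, new_clusters: list):
--     p = str(parent_name)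
--     # Phase 1: split names_list into segments delimited by occurrences of parent_name
--     # (like str.split: k occurrences give k+1 segments).
--     done = []
--     current = []
--     for x in names_list:
--         if str(x) == p:
--             done.append(current)
--             current = []
--         else:
--             current.append(x)
--     done.append(current)
--     if len(done) == 1:
--         raise ValueError(
--             "Parent name is missing from the original dataset`s column names!"
--         )
--     if len(new_clusters) != len(done) - 1:
--         raise ValueError(
--             "New cluster names list has a different length than the number of clusters in the original dataset!"
--         )
--     # Phase 2: join the segments back, interleaving the replacement names
--     # (like sep.join, with a different replacement at each seam).
--     out = list(done[0])
--     for seg, sub in zip(done[1:], new_clusters):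
--         out.append(f"{parent_name}.{sub}")
--         out.extend(seg)
--     return out
-- ===== Notes on version B (the rewrite author's own statement) =====
-- stated objective: alternative
-- what changed: B is a split-then-join algorithm: it first splits names_list into the segments delimited by occurrences of parent_name (as str.split does), validates using the segment count, then joins the segments back interleaved with the 'parent.sub' replacement names, instead of A's single running-counter scan that rebuilds the list element by element.
import Mathlib
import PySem

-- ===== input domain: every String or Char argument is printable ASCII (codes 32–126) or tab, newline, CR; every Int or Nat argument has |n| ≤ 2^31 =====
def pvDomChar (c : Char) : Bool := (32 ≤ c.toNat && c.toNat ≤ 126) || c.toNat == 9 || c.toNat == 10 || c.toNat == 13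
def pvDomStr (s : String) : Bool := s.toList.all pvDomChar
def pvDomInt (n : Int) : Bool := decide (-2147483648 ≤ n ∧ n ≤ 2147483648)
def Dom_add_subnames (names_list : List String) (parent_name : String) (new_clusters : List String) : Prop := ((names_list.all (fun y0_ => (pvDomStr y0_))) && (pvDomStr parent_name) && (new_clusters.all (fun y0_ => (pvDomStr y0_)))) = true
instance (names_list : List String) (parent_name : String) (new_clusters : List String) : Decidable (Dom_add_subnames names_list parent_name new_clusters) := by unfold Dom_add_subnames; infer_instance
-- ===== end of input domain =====

-- B is a split-then-join algorithm (split names_list into segments delimited by parent_name,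
-- then join with 'parent.sub' at the seams); A is a running-counter rebuild scan.
-- Return values proved equal on all inputs where A returns (Pre_ excludes A's two ValueErrors).

-- ===== PORT A =====
-- str(x) on a string argument is the identity, so the Python str() calls are ported as plain equality.
-- A's two ValueError raises are excluded by Pre_add_subnames; under it the counter index is always in range.
def add_subnames (names_list : List String) (parent_name : String) (new_clusters : List String) : List String :=
  (names_list.foldl
    (fun (st : List String × Int) i =>
      if i == parent_name then
        (st.1 ++ [parent_name ++ "." ++ ((PySem.List.pyGet? new_clusters st.2).getD "")], st.2 + 1)
      else
        (st.1 ++ [i], st.2))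
    ([], 0)).1

-- ===== PORT B =====
-- Phase 1 (the split loop) carries the state (done, current); 'done.append(current)' after the loop
-- gives the full segment list; Phase 2 folds over zip(done[1:], new_clusters) appending seam + segment.
-- done is nonempty by construction, so done[0] is ported as headD [].
def add_subnames_alt (names_list : List String) (parent_name : String) (new_clusters : List String) : List String :=
  let st := names_list.foldl
    (fun (st : List (List String) × List String) x =>
      if x == parent_name then (st.1 ++ [st.2], []) else (st.1, st.2 ++ [x]))
    ([], [])
  let done := st.1 ++ [st.2]
  ((done.drop 1).zip new_clusters).foldl
    (fun acc q => acc ++ [parent_name ++ "." ++ q.2] ++ q.1) (done.headD [])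

-- ===== PRECONDITION & SPEC =====
-- Pre_ excludes exactly the inputs on which A raises ValueError: parent_name absent from names_list,
-- or new_clusters not matching the number of occurrences of parent_name.
def Pre_add_subnames (names_list : List String) (parent_name : String) (new_clusters : List String) : Prop :=
  parent_name ∈ names_list ∧ new_clusters.length = names_list.count parent_name
instance (names_list : List String) (parent_name : String) (new_clusters : List String) : Decidable (Pre_add_subnames names_list parent_name new_clusters) := by unfold Pre_add_subnames; infer_instance
def pvWitness_add_subnames : List String × String × List String := (["A", "B", "A"], "A", ["1", "2"])
def Spec_add_subnames (names_list : List String) (parent_name : String) (new_clusters : List String) (out : List String) : Prop := out = add_subnames_alt names_list parent_name new_clusters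
instance (names_list : List String) (parent_name : String) (new_clusters : List String) (out : List String) : Decidable (Spec_add_subnames names_list parent_name new_clusters out) := by unfold Spec_add_subnames; infer_instance

-- ===== CLAIM (what is proved, stated in full; the proofs are below) =====
def Claim_equal_add_subnames : Prop := ∀ (names_list : List String) (parent_name : String) (new_clusters : List String), Dom_add_subnames names_list parent_name new_clusters → Pre_add_subnames names_list parent_name new_clusters → Spec_add_subnames names_list parent_name new_clusters (add_subnames names_list parent_name new_clusters)

-- ===== LEMMAS AND PROOFS =====

/-- A's loop as a cons-building recursion with the running counter. -/
def aRec (p : String) (nc : List String) : List String → Int → List String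
  | [], _ => []
  | x :: xs, k =>
    if x = p then (p ++ "." ++ ((PySem.List.pyGet? nc k).getD "")) :: aRec p nc xs (k + 1)
    else x :: aRec p nc xs k

/-- Common recursion both ports are reduced to: consume the replacement list as matches occur. -/
def bRec (p : String) : List String → List String → List String
  | [], _ => []
  | x :: xs, subs =>
    if x = p then
      match subs with
      | [] => x :: xs
      | s :: ss => (p ++ "." ++ s) :: bRec p xs ss
    else x :: bRec p xs subs

/-- The segments of xs delimited by p: (first segment, remaining segments). -/
def segsP (p : String) : List String → List String × List (List String)
  | [] => ([], [])
  | x :: xs =>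
    if x = p then ([], (segsP p xs).1 :: (segsP p xs).2)
    else (x :: (segsP p xs).1, (segsP p xs).2)

theorem foldA (p : String) (nc : List String) :
    ∀ (xs acc : List String) (k : Int),
      (xs.foldl
        (fun (st : List String × Int) i =>
          if i == p then (st.1 ++ [p ++ "." ++ ((PySem.List.pyGet? nc st.2).getD "")], st.2 + 1)
          else (st.1 ++ [i], st.2)) (acc, k)).1 = acc ++ aRec p nc xs k
  | [], acc, k => by simp [aRec]
  | x :: xs, acc, k => by
    simp only [List.foldl_cons]
    by_cases hx : x = p
    · rw [if_pos (by simp [hx]), foldA p nc xs]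
      simp [aRec, hx]
    · rw [if_neg (by simp [hx]), foldA p nc xs]
      simp [aRec, hx]

theorem aRec_eq_bRec (p : String) (nc : List String) :
    ∀ (xs : List String) (k : Nat), k + xs.count p = nc.length →
      aRec p nc xs (k : Int) = bRec p xs (nc.drop k)
  | [], _, _ => by simp [aRec, bRec]
  | x :: xs, k, h => by
    by_cases hx : x = p
    · have hc : (x :: xs).count p = xs.count p + 1 := by simp [hx]
      have hk : k < nc.length := by omega
      have hdrop : nc.drop k = nc[k] :: nc.drop (k + 1) := List.drop_eq_getElem_cons hk
      have hget : PySem.List.pyGet? nc (k : Int) = some nc[k] := by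
        simp [PySem.List.pyGet?_natCast, List.getElem?_eq_getElem hk]
      have ih := aRec_eq_bRec p nc xs (k + 1) (by omega)
      simp only [aRec, bRec, hx, if_pos, hget, Option.getD_some, hdrop]
      rw [show ((k : Int) + 1) = ((k + 1 : Nat) : Int) by push_cast; ring]
      exact congrArg _ ih
    · have hc : (x :: xs).count p = xs.count p := by simp [hx]
      have ih := aRec_eq_bRec p nc xs k (by omega)
      simp [aRec, bRec, hx, ih]

/-- Invariant of B's split loop: the done-list plus the current segment equal the
    accumulated prefix plus the segments of the remaining input. -/
theorem foldSplit (p : String) :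
    ∀ (xs : List String) (d : List (List String)) (c : List String),
      (xs.foldl
        (fun (st : List (List String) × List String) x =>
          if x == p then (st.1 ++ [st.2], []) else (st.1, st.2 ++ [x])) (d, c)).1
      ++ [(xs.foldl
        (fun (st : List (List String) × List String) x =>
          if x == p then (st.1 ++ [st.2], []) else (st.1, st.2 ++ [x])) (d, c)).2]
      = d ++ (c ++ (segsP p xs).1) :: (segsP p xs).2
  | [], d, c => by simp [segsP]
  | x :: xs, d, c => by
    simp only [List.foldl_cons]
    by_cases hx : x = p
    · rw [if_pos (by simp [hx]), foldSplit p xs (d ++ [c]) []]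
      simp [segsP, hx]
    · rw [if_neg (by simp [hx]), foldSplit p xs d (c ++ [x])]
      simp [segsP, hx]

/-- Phase-2 join fold as an append of a flatMap. -/
theorem foldJoin (p : String) :
    ∀ (l : List (List String × String)) (init : List String),
      l.foldl (fun acc q => acc ++ [p ++ "." ++ q.2] ++ q.1) init
        = init ++ l.flatMap (fun q => (p ++ "." ++ q.2) :: q.1)
  | [], init => by simp
  | q :: l, init => by
    simp only [List.foldl_cons, List.flatMap_cons, foldJoin p l]
    simp

theorem bRec_eq_segs (p : String) :
    ∀ (xs nc : List String), nc.length = xs.count p →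
      bRec p xs nc
        = (segsP p xs).1 ++ ((segsP p xs).2.zip nc).flatMap (fun q => (p ++ "." ++ q.2) :: q.1)
  | [], nc, h => by simp [bRec, segsP]
  | x :: xs, nc, h => by
    by_cases hx : x = p
    · have hc : (x :: xs).count p = xs.count p + 1 := by simp [hx]
      match nc with
      | [] => simp [hc] at h
      | s :: ss =>
        have hss : ss.length = xs.count p := by
          simp [hc] at h; omega
        have ih := bRec_eq_segs p xs ss hss
        simp [bRec, segsP, hx, ih]
    · have hc : (x :: xs).count p = xs.count p := by simp [hx]
      have ih := bRec_eq_segs p xs nc (by rw [h, hc])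
      simp [bRec, segsP, hx, ih]

-- ===== VERDICT (by name: the statement is the Claim_ definition above) =====
theorem add_subnames_spec : Claim_equal_add_subnames := by
  intro nl p nc _ hpre
  unfold Spec_add_subnames
  have hA : add_subnames nl p nc = aRec p nc nl 0 := by
    unfold add_subnames; rw [foldA p nc nl [] 0]; simp
  have h0 : (0 : Nat) + nl.count p = nc.length := by simpa using hpre.2.symm
  have hB : add_subnames_alt nl p nc
      = (segsP p nl).1 ++ ((segsP p nl).2.zip nc).flatMap (fun q => (p ++ "." ++ q.2) :: q.1) := by
    unfold add_subnames_alt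
    have hs := foldSplit p nl [] []
    simp only [List.nil_append] at hs
    simp only [hs, List.headD_cons, List.drop_one, List.tail_cons]
    exact (foldJoin p _ _).trans (by simp)
  rw [hA, hB, show ((0 : Int)) = ((0 : Nat) : Int) by rfl,
    aRec_eq_bRec p nc nl 0 h0, List.drop_zero, bRec_eq_segs p nl nc hpre.2]
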